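-- pv_equiv track=rewrite | github.com/overtimepog/CubeMerger | scripts/generate_levels.py | generate_cross_mask
-- ===== SOURCE A (Python) =====
-- from typing import List, Dict, Tuple
--
-- def generate_cross_mask(size: int) -> List[List[bool]]:
--     """
--     A plus-shaped cross: A vertical and horizontal band around the center.
--     """
--     mask = [[False]*size for _ in range(size)]
--     arm_thickness = size // 5 or 1  # minimal thickness=1
--     mid = size // 2
--     for i in range(size):
--         for j in range(size):
--             # If within arm_thickness of center row or center column
--             if abs(i - mid) <= arm_thickness or abs(j - mid) <= arm_thickness:
--                 mask[i][j] = True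
--     return mask
-- ===== SOURCE B (Python) =====
-- def generate_cross_mask(size: int):
--     arm_thickness = size // 5 or 1
--     mid = size // 2
--     band = [j for j in range(size) if abs(j - mid) <= arm_thickness]
--     col_row = [False] * size
--     for j in band:
--         col_row[j] = True
--     return [[True] * size if abs(i - mid) <= arm_thickness else list(col_row)
--             for i in range(size)]
-- ===== Notes on version B (the rewrite author's own statement) =====
-- stated objective: simpler
-- what changed: Replaces A's per-cell nested-loop OR test over an initially-all-False grid with an index-first construction: band rows are emitted as whole [True]*size rows and all other rows copy one precomputed column-band row pattern.
import Mathlib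
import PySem

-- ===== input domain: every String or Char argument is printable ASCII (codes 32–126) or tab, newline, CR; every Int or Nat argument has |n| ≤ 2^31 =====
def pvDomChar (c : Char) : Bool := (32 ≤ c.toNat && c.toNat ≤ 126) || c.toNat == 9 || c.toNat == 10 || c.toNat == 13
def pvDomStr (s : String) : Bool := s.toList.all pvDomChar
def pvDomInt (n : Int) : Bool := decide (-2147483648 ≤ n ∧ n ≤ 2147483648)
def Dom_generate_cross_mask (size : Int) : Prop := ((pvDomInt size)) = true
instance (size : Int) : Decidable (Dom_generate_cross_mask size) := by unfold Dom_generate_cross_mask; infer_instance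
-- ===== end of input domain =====

-- B builds the grid row-by-row (full True rows for the horizontal band, one shared
-- column-band row pattern elsewhere) instead of A's per-cell nested-loop test: simpler.

-- ===== PORT A =====
def generate_cross_mask (size : Int) : List (List Bool) :=
  let mask := (PySem.List.pyRange 0 size 1).map (fun _ => List.replicate size.toNat false)
  let arm_thickness := if PySem.Int.floordiv size 5 = 0 then 1 else PySem.Int.floordiv size 5
  let mid := PySem.Int.floordiv size 2
  (PySem.List.pyRange 0 size 1).foldl (fun mask i =>
    (PySem.List.pyRange 0 size 1).foldl (fun mask j =>
      if |i - mid| ≤ arm_thickness ∨ |j - mid| ≤ arm_thickness then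
        -- mask[i][j] = True  (0 ≤ i, j < size here, so the Nat indexing is exact)
        mask.modify i.toNat (fun row => row.set j.toNat true)
      else mask) mask) mask

-- ===== PORT B =====
def generate_cross_mask_alt (size : Int) : List (List Bool) :=
  let arm_thickness := if PySem.Int.floordiv size 5 = 0 then 1 else PySem.Int.floordiv size 5
  let mid := PySem.Int.floordiv size 2
  let band := (PySem.List.pyRange 0 size 1).filter (fun j => decide (|j - mid| ≤ arm_thickness))
  let col_row := band.foldl (fun row j => row.set j.toNat true) (List.replicate size.toNat false)
  (PySem.List.pyRange 0 size 1).map (fun i =>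
    if |i - mid| ≤ arm_thickness then List.replicate size.toNat true else col_row)

-- ===== PRECONDITION & SPEC =====
def Spec_generate_cross_mask (size : Int) (out : List (List Bool)) : Prop := out = generate_cross_mask_alt size
instance (size : Int) (out : List (List Bool)) : Decidable (Spec_generate_cross_mask size out) := by unfold Spec_generate_cross_mask; infer_instance

-- ===== CLAIM (what is proved, stated in full; the proofs are below) =====
def Claim_equal_generate_cross_mask : Prop := ∀ (size : Int), Dom_generate_cross_mask size → Spec_generate_cross_mask size (generate_cross_mask size)

-- ===== LEMMAS AND PROOFS =====

-- an 'if cond then f else skip' fold is the fold over the filtered list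
theorem pv_foldl_ite {β : Type} (p : Int → Prop) [DecidablePred p] (f : β → Int → β) :
    ∀ (js : List Int) (b : β),
      js.foldl (fun r j => if p j then f r j else r) b
        = (js.filter (fun j => decide (p j))).foldl f b := by
  intro js
  induction js with
  | nil => intro b; rfl
  | cons j js ih =>
    intro b
    by_cases h : p j <;> simp [h, ih]

-- length is preserved by a fold of sets
theorem pv_foldl_set_length : ∀ (js : List Int) (row : List Bool),
    (js.foldl (fun r j => r.set j.toNat true) row).length = row.length := by
  intro js
  induction js with
  | nil => intro row; rfl
  | cons j js ih => intro row; simp [ih]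

-- a fold of sets at nonnegative indices, read back pointwise
theorem pv_foldl_set_getElem : ∀ (js : List Int) (row : List Bool) (k : Nat)
    (hk : k < row.length) (hk' : k < (js.foldl (fun r j => r.set j.toNat true) row).length),
    (∀ j ∈ js, 0 ≤ j) →
    (js.foldl (fun r j => r.set j.toNat true) row)[k] = (row[k] || decide ((k : Int) ∈ js)) := by
  intro js
  induction js with
  | nil => intro row k hk hk' _; simp
  | cons j js ih =>
    intro row k hk hk' hpos
    have hj : 0 ≤ j := hpos j (by simp)
    have hrec := ih (row.set j.toNat true) k (by simpa using hk)
      (by simpa [pv_foldl_set_length] using hk) (fun x hx => hpos x (by simp [hx]))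
    simp only [List.foldl_cons] at *
    rw [hrec]
    rw [List.getElem_set]
    by_cases hjk : j = (k : Int)
    · have : j.toNat = k := by omega
      simp [hjk]
    · have hne : j.toNat ≠ k := by omega
      have hne2 : ¬ ((k : Int) = j) := fun h => hjk h.symm
      simp [hne, hne2]

-- modify at the same index composes
theorem pv_modify_comp {α : Type} (m : List α) (k : Nat) (f g : α → α) :
    (m.modify k f).modify k g = m.modify k (fun r => g (f r)) := by
  apply List.ext_getElem
  · simp
  · intro i h1 h2
    simp only [List.getElem_modify]
    split_ifs <;> rfl

theorem pv_modify_id {α : Type} (m : List α) (k : Nat) :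
    m.modify k (fun r => r) = m := by
  apply List.ext_getElem
  · simp
  · intro i h1 h2
    simp only [List.getElem_modify]
    split_ifs <;> rfl

-- a fold of modifies at one fixed index is a single modify by the folded row-function
theorem pv_foldl_modify {α : Type} (k : Nat) (g : Int → α → α) :
    ∀ (js : List Int) (m : List α),
      js.foldl (fun m j => m.modify k (g j)) m
        = m.modify k (fun r => js.foldl (fun r j => g j r) r) := by
  intro js
  induction js with
  | nil => intro m; simp [pv_modify_id]
  | cons j js ih => intro m; simp [ih, pv_modify_comp]

-- length after the row-modify fold
theorem pv_foldl_modify_length {α : Type} (F : Int → α → α) :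
    ∀ (is : List Int) (m : List α),
      (is.foldl (fun m i => m.modify i.toNat (F i)) m).length = m.length := by
  intro is
  induction is with
  | nil => intro m; rfl
  | cons i is ih => intro m; simp [ih]

-- reading one cell back through a fold of modifies at varying index
theorem pv_foldl_modify_getElem {α : Type} (F : Int → α → α) :
    ∀ (is : List Int) (m : List α) (k : Nat) (hk : k < m.length)
      (hk' : k < (is.foldl (fun m i => m.modify i.toNat (F i)) m).length),
      (is.foldl (fun m i => m.modify i.toNat (F i)) m)[k]
        = is.foldl (fun v i => if i.toNat = k then F i v else v) m[k] := by
  intro is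
  induction is with
  | nil => intro m k hk hk'; rfl
  | cons i is ih =>
    intro m k hk hk'
    simp only [List.foldl_cons]
    rw [ih (m.modify i.toNat (F i)) k (by simpa using hk)
        (by simpa [pv_foldl_modify_length] using hk)]
    rw [List.getElem_modify]

-- the scalar fold over range N applies F exactly at k
theorem pv_scalar_range {β : Type} (F : Nat → β → β) (k : Nat) :
    ∀ (N : Nat), k < N →
      ∀ (v : β), (List.range N).foldl (fun v a => if a = k then F a v else v) v = F k v := by
  intro N
  induction N with
  | zero => omega
  | succ N ih =>
    intro hk v
    rw [List.range_succ, List.foldl_append]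
    by_cases h : k < N
    · rw [ih h]
      have : ¬ (N = k) := by omega
      simp [this]
    · have hkN : k = N := by omega
      have skip : ∀ (l : List Nat), (∀ a ∈ l, a ≠ k) →
          l.foldl (fun v a => if a = k then F a v else v) v = v := by
        intro l
        induction l with
        | nil => intro _; rfl
        | cons a l ihl =>
          intro hall
          simp only [List.foldl_cons]
          rw [if_neg (by exact hall a (by simp))]
          exact ihl (fun x hx => hall x (by simp [hx]))
      rw [skip _ (fun a ha => by have := List.mem_range.mp ha; omega)]
      simp [hkN]

theorem generate_cross_mask_spec_aux (size : Int) :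
    generate_cross_mask size = generate_cross_mask_alt size := by
  simp only [generate_cross_mask, generate_cross_mask_alt]
  set t := if PySem.Int.floordiv size 5 = 0 then 1 else PySem.Int.floordiv size 5 with ht
  set mid := PySem.Int.floordiv size 2 with hmid
  set n := size.toNat with hn
  have hrange : PySem.List.pyRange 0 size 1 = List.map (fun k : Nat => (k : Int)) (List.range n) := by
    rw [PySem.List.pyRange_one]
    simp only [zero_add, sub_zero, hn]
  rw [hrange]
  -- name the row-filling function and rewrite the inner loop as a single modify
  set rowop : Int → List Bool → List Bool := fun i r =>
    (List.map (fun k : Nat => (k : Int)) (List.range n)).foldl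
      (fun r j => if |i - mid| ≤ t ∨ |j - mid| ≤ t then r.set j.toNat true else r) r
    with hrowop
  have step_eq : (fun (mask : List (List Bool)) (i : Int) =>
      (List.map (fun k : Nat => (k : Int)) (List.range n)).foldl
        (fun mask j => if |i - mid| ≤ t ∨ |j - mid| ≤ t then
            mask.modify i.toNat (fun row => row.set j.toNat true) else mask) mask)
      = (fun mask i => mask.modify i.toNat (rowop i)) := by
    funext mask i
    have hb : (fun (mask : List (List Bool)) (j : Int) =>
        if |i - mid| ≤ t ∨ |j - mid| ≤ t then
          mask.modify i.toNat (fun row => row.set j.toNat true) else mask)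
        = (fun mask j => mask.modify i.toNat
            (fun r => if |i - mid| ≤ t ∨ |j - mid| ≤ t then r.set j.toNat true else r)) := by
      funext mask j
      split_ifs with h
      · rfl
      · exact (pv_modify_id mask i.toNat).symm
    rw [hb, pv_foldl_modify]
  rw [step_eq]
  -- characterise a filled row pointwise
  have rowop_len : ∀ (i : Int) (r : List Bool), (rowop i r).length = r.length := by
    intro i r
    rw [hrowop]
    simp only []
    rw [pv_foldl_ite (fun j => |i - mid| ≤ t ∨ |j - mid| ≤ t)]
    exact pv_foldl_set_length _ r
  have rowop_get : ∀ (i : Int) (r : List Bool) (l : Nat) (hl : r.length = n) (hln : l < n)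
      (hl2 : l < (rowop i r).length),
      (rowop i r)[l] = (r[l]'(by omega) || decide (|i - mid| ≤ t ∨ |(l : Int) - mid| ≤ t)) := by
    intro i r l hl hln hl2
    have h1 : (rowop i r) = ((List.map (fun k : Nat => (k : Int)) (List.range n)).filter
        (fun j => decide (|i - mid| ≤ t ∨ |j - mid| ≤ t))).foldl
        (fun r j => r.set j.toNat true) r := by
      rw [hrowop]; simp only []
      rw [pv_foldl_ite (fun j => |i - mid| ≤ t ∨ |j - mid| ≤ t)]
    have hpos : ∀ j ∈ ((List.map (fun k : Nat => (k : Int)) (List.range n)).filter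
        (fun j => decide (|i - mid| ≤ t ∨ |j - mid| ≤ t))), 0 ≤ j := by
      intro j hj
      simp only [List.mem_filter, List.mem_map, List.mem_range] at hj
      obtain ⟨⟨a, _, rfl⟩, _⟩ := hj
      exact Int.natCast_nonneg a
    rw [List.getElem_of_eq h1]
    rw [pv_foldl_set_getElem _ r l (by omega) (by rw [← h1]; exact hl2) hpos]
    congr 1
    simp only [List.mem_filter, List.mem_map, List.mem_range]
    by_cases hc : |i - mid| ≤ t ∨ |(l : Int) - mid| ≤ t
    · simp only [decide_eq_decide]
      constructor
      · intro _; exact hc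
      · intro _; exact ⟨⟨l, hln, rfl⟩, by simpa using hc⟩
    · simp only [decide_eq_decide]
      constructor
      · rintro ⟨-, h⟩
        exact absurd (by simpa using h) hc
      · intro h; exact absurd h hc
  -- the two sides, elementwise
  apply List.ext_getElem
  · rw [pv_foldl_modify_length]
    simp
  · intro k h1 h2
    have hk : k < n := by
      have := h1
      rw [pv_foldl_modify_length] at this
      simpa using this
    rw [pv_foldl_modify_getElem _ _ _ k (by simpa) h1]
    rw [List.foldl_map]
    simp only [List.getElem_map]
    have hfun : (fun (x : List Bool) (y : Nat) => if ((y : Int)).toNat = k then rowop (y : Int) x else x)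
        = (fun (v : List Bool) (a : Nat) => if a = k then rowop (a : Int) v else v) := by
      funext x y
      simp
    rw [hfun]
    have hsc := pv_scalar_range (fun (a : Nat) (v : List Bool) => rowop (a : Int) v) k n hk
      (List.replicate n false)
    beta_reduce at hsc
    rw [hsc]
    -- right side
    simp only [List.getElem_range]
    by_cases hband : |(k : Int) - mid| ≤ t
    · rw [if_pos hband]
      apply List.ext_getElem
      · rw [rowop_len]; simp
      · intro l hl hl2
        have hln : l < n := by rw [rowop_len] at hl; simpa using hl
        rw [rowop_get _ _ l (by simp) hln hl]
        simp [hband]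
    · rw [if_neg hband]
      apply List.ext_getElem
      · rw [rowop_len]
        rw [pv_foldl_set_length]
      · intro l hl hl2
        have hln : l < n := by rw [rowop_len] at hl; simpa using hl
        rw [rowop_get _ _ l (by simp) hln hl]
        rw [pv_foldl_set_getElem _ _ l (by simp only [List.length_replicate]; exact hln)
          (by rw [pv_foldl_set_length]; simp only [List.length_replicate]; exact hln) (by
            intro j hj
            simp only [List.mem_filter, List.mem_map, List.mem_range] at hj
            obtain ⟨⟨a, _, rfl⟩, _⟩ := hj
            exact Int.natCast_nonneg a)]
        simp only [List.getElem_replicate, Bool.false_or]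
        congr 1
        simp only [List.mem_filter, List.mem_map, List.mem_range]
        rw [eq_iff_iff]
        by_cases hc : |(l : Int) - mid| ≤ t
        · exact ⟨fun _ => ⟨⟨l, hln, rfl⟩, by simpa using hc⟩, fun _ => Or.inr hc⟩
        · constructor
          · intro h
            exact absurd (h.elim (fun hb => absurd hb hband) id) hc
          · rintro ⟨-, h⟩
            exact absurd (by simpa using h) hc

-- ===== VERDICT (by name: the statement is the Claim_ definition above) =====
theorem generate_cross_mask_spec : Claim_equal_generate_cross_mask := by
  intro size _
  unfold Spec_generate_cross_mask
  exact generate_cross_mask_spec_aux size
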